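-- pv_equiv track=rewrite | github.com/LiRiordan/Leclerc_Tilting | present.py | k_split
-- ===== SOURCE A (Python) =====
-- def k_split(a:int, b:int, k:list[int]):
--     out_1 = []
--     out_2 = []
--     out_3 = []
--     for i in range(a):
--         for j in range(b):
--             if i - j < k[1]:
--                 out_1.append([i,j])
--             elif i - j > k[0]:
--                 out_2.append([i,j])
--             else:
--                 out_3.append([i,j])
--     return out_1, out_2, out_3
-- ===== SOURCE B (Python) =====
-- def k_split(a: int, b: int, k: list[int]):
--     # Per-row segment arithmetic instead of per-cell classification.
--     out_1 = []
--     out_2 = []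
--     out_3 = []
--     if a <= 0 or b <= 0:
--         return out_1, out_2, out_3
--     k0, k1 = k[0], k[1]
--     for i in range(a):
--         lo1 = min(max(i - k1 + 1, 0), b)          # first j with i - j < k1 is lo1 (clamped)
--         m = min(max(i - k0, 0), lo1)              # boundary between out_2 and out_3
--         out_2.extend([i, j] for j in range(0, m))
--         out_3.extend([i, j] for j in range(m, lo1))
--         out_1.extend([i, j] for j in range(lo1, b))
--     return out_1, out_2, out_3
-- ===== Notes on version B (the rewrite author's own statement) =====
-- stated objective: alternative
-- what changed: B replaces the per-cell if/elif classification of the inner loop by per-row integer boundary arithmetic: for each row i it computes the two clamped cut points m and lo1 and emits the three contiguous j-segments [0,m), [m,lo1), [lo1,b) directly, so no comparison is done per cell; cost is dominated by building the same output.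
import Mathlib
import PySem

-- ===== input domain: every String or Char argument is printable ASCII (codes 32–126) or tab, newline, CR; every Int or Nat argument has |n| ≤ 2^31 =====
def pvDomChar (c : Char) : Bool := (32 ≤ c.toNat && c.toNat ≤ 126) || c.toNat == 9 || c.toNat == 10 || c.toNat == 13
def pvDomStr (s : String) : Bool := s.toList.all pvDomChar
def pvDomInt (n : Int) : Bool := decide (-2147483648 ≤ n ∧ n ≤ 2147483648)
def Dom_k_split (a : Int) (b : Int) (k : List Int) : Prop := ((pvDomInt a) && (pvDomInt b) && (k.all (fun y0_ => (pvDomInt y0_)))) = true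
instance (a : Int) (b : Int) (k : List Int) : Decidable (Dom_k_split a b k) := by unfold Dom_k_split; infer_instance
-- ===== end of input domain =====

-- B replaces the per-cell if/elif classification by per-row clamped boundary arithmetic
-- emitting the three contiguous j-segments of each row directly.

-- ===== PORT A =====
-- literal port of A: nested for-loops, classify each (i,j) by the if/elif chain;
-- k[1]/k[0] are ported as pyGetD with default 0 (Pre_ excludes the inputs where Python raises IndexError)
def k_split (a : Int) (b : Int) (k : List Int) : List (List Int) × List (List Int) × List (List Int) :=
  (PySem.List.pyRange 0 a 1).foldl (fun s i =>
    (PySem.List.pyRange 0 b 1).foldl (fun s j =>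
      if i - j < PySem.List.pyGetD k 1 0 then (s.1 ++ [[i, j]], s.2.1, s.2.2)
      else if i - j > PySem.List.pyGetD k 0 0 then (s.1, s.2.1 ++ [[i, j]], s.2.2)
      else (s.1, s.2.1, s.2.2 ++ [[i, j]])) s) ([], [], [])

-- ===== PORT B =====
-- literal port of B: early return on empty grid, then per-row boundaries lo1, m and
-- three range-built segments appended to the accumulators
def k_split_alt (a : Int) (b : Int) (k : List Int) : List (List Int) × List (List Int) × List (List Int) :=
  if a ≤ 0 ∨ b ≤ 0 then ([], [], [])
  else
    let k0 := PySem.List.pyGetD k 0 0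
    let k1 := PySem.List.pyGetD k 1 0
    (PySem.List.pyRange 0 a 1).foldl (fun s i =>
      let lo1 := min (max (i - k1 + 1) 0) b
      let m := min (max (i - k0) 0) lo1
      (s.1 ++ (PySem.List.pyRange lo1 b 1).map (fun j => [i, j]),
       s.2.1 ++ (PySem.List.pyRange 0 m 1).map (fun j => [i, j]),
       s.2.2 ++ (PySem.List.pyRange m lo1 1).map (fun j => [i, j]))) ([], [], [])

-- ===== PRECONDITION & SPEC =====
-- Pre_ excludes exactly the inputs where Python A raises IndexError (a,b > 0 but len(k) < 2)
def Pre_k_split (a : Int) (b : Int) (k : List Int) : Prop := 0 < a → 0 < b → 2 ≤ k.length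
instance (a : Int) (b : Int) (k : List Int) : Decidable (Pre_k_split a b k) := by unfold Pre_k_split; infer_instance
def pvWitness_k_split : Int × Int × List Int := (3, 3, [1, 0])
def Spec_k_split (a : Int) (b : Int) (k : List Int) (out : List (List Int) × List (List Int) × List (List Int)) : Prop := out = k_split_alt a b k
instance (a : Int) (b : Int) (k : List Int) (out : List (List Int) × List (List Int) × List (List Int)) : Decidable (Spec_k_split a b k out) := by unfold Spec_k_split; infer_instance

-- ===== CLAIM (what is proved, stated in full; the proofs are below) =====
def Claim_equal_k_split : Prop := ∀ (a : Int) (b : Int) (k : List Int), Dom_k_split a b k → Pre_k_split a b k → Spec_k_split a b k (k_split a b k)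

-- ===== LEMMAS AND PROOFS =====

-- the classifier of A's inner loop, for fixed i and thresholds k0 k1
def pvStep (k0 k1 i : Int) (s : List (List Int) × List (List Int) × List (List Int)) (j : Int) :
    List (List Int) × List (List Int) × List (List Int) :=
  if i - j < k1 then (s.1 ++ [[i, j]], s.2.1, s.2.2)
  else if i - j > k0 then (s.1, s.2.1 ++ [[i, j]], s.2.2)
  else (s.1, s.2.1, s.2.2 ++ [[i, j]])

theorem pvFoldlExt {α β : Type} (f g : β → α → β) (l : List α) (init : β)
    (h : ∀ s x, f s x = g s x) : l.foldl f init = l.foldl g init := by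
  induction l generalizing init with
  | nil => rfl
  | cons x t ih => simp only [List.foldl_cons, h]; exact ih _

theorem pvFoldlId {α β : Type} (l : List α) (init : β) :
    l.foldl (fun s _ => s) init = init := by
  induction l generalizing init with
  | nil => rfl
  | cons x t ih => exact ih _

-- every element of l goes to bucket 1
theorem pvBucket1 (k0 k1 i : Int) (l : List Int) (h : ∀ j ∈ l, i - j < k1) :
    ∀ s, l.foldl (pvStep k0 k1 i) s = (s.1 ++ l.map (fun j => [i, j]), s.2.1, s.2.2) := by
  induction l with
  | nil => intro s; simp
  | cons x t ih =>
    intro s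
    have hx := h x (List.mem_cons_self)
    have ih' := fun j hj => h j (List.mem_cons_of_mem _ hj)
    simp only [List.foldl_cons, List.map_cons, pvStep, if_pos hx]
    rw [ih ih']
    simp

-- every element of l goes to bucket 2
theorem pvBucket2 (k0 k1 i : Int) (l : List Int) (h : ∀ j ∈ l, ¬ i - j < k1 ∧ i - j > k0) :
    ∀ s, l.foldl (pvStep k0 k1 i) s = (s.1, s.2.1 ++ l.map (fun j => [i, j]), s.2.2) := by
  induction l with
  | nil => intro s; simp
  | cons x t ih =>
    intro s
    obtain ⟨h1, h2⟩ := h x (List.mem_cons_self)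
    have ih' := fun j hj => h j (List.mem_cons_of_mem _ hj)
    simp only [List.foldl_cons, List.map_cons, pvStep, if_neg h1, if_pos h2]
    rw [ih ih']
    simp

-- every element of l goes to bucket 3
theorem pvBucket3 (k0 k1 i : Int) (l : List Int) (h : ∀ j ∈ l, ¬ i - j < k1 ∧ ¬ i - j > k0) :
    ∀ s, l.foldl (pvStep k0 k1 i) s = (s.1, s.2.1, s.2.2 ++ l.map (fun j => [i, j])) := by
  induction l with
  | nil => intro s; simp
  | cons x t ih =>
    intro s
    obtain ⟨h1, h2⟩ := h x (List.mem_cons_self)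
    have ih' := fun j hj => h j (List.mem_cons_of_mem _ hj)
    simp only [List.foldl_cons, List.map_cons, pvStep, if_neg h1, if_neg h2]
    rw [ih ih']
    simp

-- one row of A, split at abstract cut points m and lo1
theorem pvRowGen (k0 k1 i b m lo1 : Int) (h0 : 0 ≤ m) (h1 : m ≤ lo1) (h2 : lo1 ≤ b)
    (hlow : ∀ j, 0 ≤ j → j < m → ¬ i - j < k1 ∧ i - j > k0)
    (hmid : ∀ j, m ≤ j → j < lo1 → ¬ i - j < k1 ∧ ¬ i - j > k0)
    (hhi : ∀ j, lo1 ≤ j → j < b → i - j < k1)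
    (s : List (List Int) × List (List Int) × List (List Int)) :
    (PySem.List.pyRange 0 b 1).foldl (pvStep k0 k1 i) s =
      (s.1 ++ (PySem.List.pyRange lo1 b 1).map (fun j => [i, j]),
       s.2.1 ++ (PySem.List.pyRange 0 m 1).map (fun j => [i, j]),
       s.2.2 ++ (PySem.List.pyRange m lo1 1).map (fun j => [i, j])) := by
  rw [PySem.List.pyRange_one_append 0 m b h0 (by omega),
      PySem.List.pyRange_one_append m lo1 b h1 h2,
      List.foldl_append, List.foldl_append]
  rw [pvBucket2 k0 k1 i (PySem.List.pyRange 0 m 1) (fun j hj => by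
        have hb := (PySem.List.mem_pyRange_one).mp hj
        exact hlow j hb.1 hb.2)]
  rw [pvBucket3 k0 k1 i (PySem.List.pyRange m lo1 1) (fun j hj => by
        have hb := (PySem.List.mem_pyRange_one).mp hj
        exact hmid j hb.1 hb.2)]
  rw [pvBucket1 k0 k1 i (PySem.List.pyRange lo1 b 1) (fun j hj => by
        have hb := (PySem.List.mem_pyRange_one).mp hj
        exact hhi j hb.1 hb.2)]

-- one row of A equals one row of B (cut points instantiated with B's clamped boundaries)
theorem pvRow (k0 k1 i b : Int) (hb : 0 < b)
    (s : List (List Int) × List (List Int) × List (List Int)) :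
    (PySem.List.pyRange 0 b 1).foldl (pvStep k0 k1 i) s =
      (s.1 ++ (PySem.List.pyRange (min (max (i - k1 + 1) 0) b) b 1).map (fun j => [i, j]),
       s.2.1 ++ (PySem.List.pyRange 0 (min (max (i - k0) 0) (min (max (i - k1 + 1) 0) b)) 1).map (fun j => [i, j]),
       s.2.2 ++ (PySem.List.pyRange (min (max (i - k0) 0) (min (max (i - k1 + 1) 0) b)) (min (max (i - k1 + 1) 0) b) 1).map (fun j => [i, j])) := by
  apply pvRowGen
  · omega
  · omega
  · omega
  · intro j hj0 hjm; constructor <;> omega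
  · intro j hj0 hjm; constructor <;> omega
  · intro j hj0 hjm; omega

-- ===== VERDICT (by name: the statement is the Claim_ definition above) =====
theorem k_split_spec : Claim_equal_k_split := by
  intro a b k _ _
  unfold Spec_k_split k_split k_split_alt
  by_cases h : a ≤ 0 ∨ b ≤ 0
  · rw [if_pos h]
    rcases h with h | h
    · rw [show PySem.List.pyRange 0 a 1 = [] from PySem.List.pyRange_one_eq_nil (by omega)]
      rfl
    · rw [show PySem.List.pyRange 0 b 1 = [] from PySem.List.pyRange_one_eq_nil (by omega)]
      simp only [List.foldl_nil]
      exact pvFoldlId _ _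
  · rw [if_neg h]
    dsimp only
    exact pvFoldlExt _ _ _ _ (fun s i => pvRow _ _ i b (by omega) s)
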